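-- pv_equiv track=rewrite | github.com/Deep-Arande/Python15Days | Day7 (Dictionaries and Sets)/Program_10.py | return_unique
-- ===== SOURCE A (Python) =====
-- def unique_chars(str1):
--
--     count_dict = dict()
--     word = str()  # to store characters in string that occure atleast once
--     for i in str1:
--
--         if i not in word:
--             word += i
--             count_dict[i] = 1
--         else:
--             count_dict[i] += 1
--
--     r_char = str()  # string to return characters that occurs only once
--
--     for i in count_dict.keys():
--
--         if count_dict[i] == 1:
--             r_char += i
--
--
--     return r_char
--
-- def return_unique(s_list):
--
--     set_list = list()  # list to store sets
--
--     for i in s_list: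
--
--         u_set = set()
--         u_set.add(unique_chars(i.lower()))  # add unique characters in set
--
--
--         set_list.append(u_set.copy())  # add set in the list
--         u_set.clear()  # clear the set to add new items
--
--     return set_list
-- ===== SOURCE B (Python) =====
-- def unique_chars(str1):
--     return ''.join(c for c in str1 if str1.count(c) == 1)
--
-- def return_unique(s_list):
--     return [{unique_chars(s.lower())} for s in s_list]
-- ===== Notes on version B (the rewrite author's own statement) =====
-- stated objective: simpler
-- what changed: B drops A's two-pass build-a-count-dict-then-iterate-keys machinery: it keeps a character iff str.count says it occurs exactly once (each kept char occurs once, so iterating the string and iterating the dict keys give the same order), and builds the result as a comprehension instead of A's append/clear set choreography.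
import Mathlib
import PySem

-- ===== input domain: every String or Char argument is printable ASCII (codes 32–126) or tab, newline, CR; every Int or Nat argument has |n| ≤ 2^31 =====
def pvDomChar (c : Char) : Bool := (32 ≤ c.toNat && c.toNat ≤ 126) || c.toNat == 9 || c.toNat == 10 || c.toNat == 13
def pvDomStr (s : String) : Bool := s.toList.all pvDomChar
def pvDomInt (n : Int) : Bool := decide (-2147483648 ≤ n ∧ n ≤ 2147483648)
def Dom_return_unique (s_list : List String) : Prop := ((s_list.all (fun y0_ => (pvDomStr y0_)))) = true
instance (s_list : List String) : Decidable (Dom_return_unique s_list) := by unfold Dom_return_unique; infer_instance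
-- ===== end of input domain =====

-- ===== PORT A =====
-- B changes: no count dict — keep each char iff str.count(c)==1 (comprehension); simpler, same values.
-- A-side helper: port of unique_chars. 'word' (a Python str of single chars) is a List Char;
-- 'i not in word' on single chars is exactly list membership. count_dict[i] += 1 is modify (key present).
def pvUniqueChars (str1 : String) : String :=
  let st := str1.toList.foldl
    (fun (s : List Char × PySem.Dict Char Int) i =>
      if !(s.1.contains i) then (s.1 ++ [i], s.2.insert i 1)
      else (s.1, s.2.modify i 0 (· + 1)))
    ([], PySem.Dict.empty)
  -- second loop: over count_dict.keys(), append chars whose count is 1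
  String.ofList (st.2.keys.foldl (fun acc i => if st.2.getD i 0 == 1 then acc ++ [i] else acc) [])

def return_unique (s_list : List String) : List (List String) :=
  s_list.foldl (fun set_list i =>
    set_list ++ [PySem.Set.add PySem.Set.empty (pvUniqueChars (PySem.Str.lower i))]) []

-- ===== PORT B =====
-- str1.count(c) for a single character c is the number of occurrences of c, i.e. List.count on the chars.
def pvUniqueCharsAlt (str1 : String) : String :=
  String.ofList (str1.toList.filter (fun c => str1.toList.count c == 1))

def return_unique_alt (s_list : List String) : List (List String) :=
  s_list.map (fun s => PySem.Set.add PySem.Set.empty (pvUniqueCharsAlt (PySem.Str.lower s)))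

-- ===== PRECONDITION & SPEC =====
def Spec_return_unique (s_list : List String) (out : List (List String)) : Prop := out = return_unique_alt s_list
instance (s_list : List String) (out : List (List String)) : Decidable (Spec_return_unique s_list out) := by unfold Spec_return_unique; infer_instance

-- ===== CLAIM (what is proved, stated in full; the proofs are below) =====
def Claim_equal_return_unique : Prop := ∀ (s_list : List String), Dom_return_unique s_list → Spec_return_unique s_list (return_unique s_list)

-- ===== LEMMAS AND PROOFS =====

theorem pvOfListSnoc (l : List Char) (x : Char) :
    PySem.Set.ofList (l ++ [x]) = if x ∈ l then PySem.Set.ofList l else PySem.Set.ofList l ++ [x] := by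
  rw [PySem.Set.ofList_eq_foldl, List.foldl_append, ← PySem.Set.ofList_eq_foldl]
  simp only [List.foldl_cons, List.foldl_nil, PySem.Set.add]
  by_cases hx : x ∈ l
  · simp [PySem.Set.contains, PySem.Set.mem_ofList, hx]
  · simp [PySem.Set.contains, PySem.Set.mem_ofList, hx]

-- A's first loop computes (first-occurrence dedup, Counter) of the processed characters.
theorem pvLoopA (l : List Char) :
    l.foldl (fun (s : List Char × PySem.Dict Char Int) i =>
      if !(s.1.contains i) then (s.1 ++ [i], s.2.insert i 1)
      else (s.1, s.2.modify i 0 (· + 1))) ([], PySem.Dict.empty)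
    = (PySem.Set.ofList l, PySem.Dict.counter l) := by
  induction l using List.reverseRecOn with
  | nil => rfl
  | append_singleton l x ih =>
    rw [List.foldl_append, ih]
    simp only [List.foldl_cons, List.foldl_nil]
    rw [PySem.Dict.counter_append_singleton]
    rw [pvOfListSnoc]
    by_cases hx : x ∈ l
    · have hc : (PySem.Set.ofList l).contains x = true := by
        simp [PySem.Set.mem_ofList, hx]
      simp [hx]
    · have hc : (PySem.Set.ofList l).contains x = false := by
        simp [PySem.Set.mem_ofList, hx]
      have hcount : l.count x = 0 := List.count_eq_zero.mpr hx
      have hmod : (PySem.Dict.counter l).modify x 0 (· + 1) = (PySem.Dict.counter l).insert x 1 := by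
        show (PySem.Dict.counter l).insert x ((PySem.Dict.counter l).getD x 0 + 1) = _
        rw [PySem.Dict.getD_counter]
        simp [hcount]
      simp [hmod, hx]

-- filtering the dedup by a predicate that only holds for count-1 chars = filtering the list itself
theorem pvFilterDedup (l : List Char) (p : Char → Bool)
    (h : ∀ c, p c = true → l.count c ≤ 1) :
    (PySem.Set.ofList l).filter p = l.filter p := by
  induction l using List.reverseRecOn with
  | nil => rfl
  | append_singleton l x ih =>
    have h' : ∀ c, p c = true → l.count c ≤ 1 := by
      intro c hc
      have := h c hc
      have hle : l.count c ≤ (l ++ [x]).count c := by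
        simp [List.count_append]
      omega
    by_cases hx : x ∈ l
    · have hpx : p x = false := by
        by_contra hpx
        have hpx' : p x = true := by
          cases hqx : p x with
          | false => exact absurd hqx hpx
          | true => rfl
        have := h x hpx'
        have h1 : 1 ≤ l.count x := List.one_le_count_iff.mpr hx
        have : (l ++ [x]).count x = l.count x + 1 := by simp [List.count_append]
        omega
      rw [pvOfListSnoc]
      simp only [hx, if_true]
      rw [ih h', List.filter_append]
      simp [hpx]
    · rw [pvOfListSnoc]
      simp only [hx, if_false]
      rw [List.filter_append, List.filter_append, ih h']

theorem pvUniqueChars_eq (s : String) : pvUniqueChars s = pvUniqueCharsAlt s := by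
  unfold pvUniqueChars pvUniqueCharsAlt
  rw [pvLoopA]
  simp only []
  rw [PySem.List.foldl_append_if_eq_filter]
  rw [PySem.Dict.keys_counter]
  have hp : (fun i => (PySem.Dict.counter s.toList).getD i 0 == 1)
      = (fun c => s.toList.count c == 1) := by
    funext c
    rw [PySem.Dict.getD_counter]
    cases hc : s.toList.count c == 1 with
    | true =>
      have : s.toList.count c = 1 := by
        have := (beq_iff_eq).mp hc; exact this
      simp [this]
    | false =>
      have hne : s.toList.count c ≠ 1 := by
        intro h1; rw [h1] at hc; simp at hc
      have : ((s.toList.count c : Int)) ≠ 1 := by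
        intro h1
        exact hne (by exact_mod_cast h1)
      simp [this]
  rw [hp]
  rw [pvFilterDedup _ _ (by
    intro c hc
    have : s.toList.count c = 1 := (beq_iff_eq).mp hc
    omega)]
  simp

-- ===== VERDICT (by name: the statement is the Claim_ definition above) =====
theorem return_unique_spec : Claim_equal_return_unique := by
  intro s_list _
  unfold Spec_return_unique return_unique return_unique_alt
  rw [PySem.List.foldl_append_singleton_eq_map]
  simp [pvUniqueChars_eq]
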